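-- pv_equiv track=rewrite | github.com/zaker1998/ProcessMiningVisualization_SS25_Dussaliyev_ | logs/splits.py | parallel_split
-- ===== SOURCE A (Python) =====
-- def parallel_split(log: dict[tuple[str, ...], int], partitions: list[set[str]]):
--     """Split the log into multiple logs based on the partitions. All traces are projected onto all partitions,
--     so that a projection of a trace does only contain the events that are in the partition.
--
--     Parameters
--     ----------
--     log : dict[tuple[str, ...], int]
--         A dictionary containing the traces and their frequencies in the log.
--     partitions : list[set[str]]
--         A list of partitions, where each partition is a set of events.
--
--     Returns
--     -------
--     list[dict[tuple[str, ...], int]]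
--         a list of split logs, where each log contains the traces that belong to the corresponding partition.
--     """
--     split_logs = [{} for _ in range(len(partitions))]
--     for trace, frequency in log.items():
--         sub_traces = [[] for _ in range(len(partitions))]
--         if trace == tuple():
--             continue
--         for event in trace:
--             for i, partition in enumerate(partitions):
--                 if event in partition:
--                     sub_traces[i].append(event)
--                     break
--
--         for i, sub_trace in enumerate(sub_traces):
--             split_logs[i][tuple(sub_trace)] = (
--                 split_logs[i].get(tuple(sub_trace), 0) + frequency
--             )
--
--     return split_logs
-- ===== SOURCE B (Python) =====
-- def parallel_split(log, partitions):
--     """Partition-major split: for each partition compute the set of events it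
--     OWNS (its events minus those claimed by earlier partitions), then build that
--     partition's split log in one pass over the traces by filtering each trace
--     through the owned set."""
--     split_logs = []
--     seen = set()
--     for partition in partitions:
--         owned = set(partition) - seen
--         seen |= owned
--         split = {}
--         for trace, frequency in log.items():
--             if not trace:
--                 continue
--             key = tuple(e for e in trace if e in owned)
--             split[key] = split.get(key, 0) + frequency
--         split_logs.append(split)
--     return split_logs
-- ===== Notes on version B (the rewrite author's own statement) =====
-- stated objective: alternative
-- what changed: B is partition-major: it computes each partition's owned event set once by set difference against the running union of earlier partitions, then builds each split log in its own pass over the traces by filtering each trace through that owned set, instead of A's trace-major loop that scans the partition list per event and maintains per-trace sub_traces arrays updated in lock-step.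
import Mathlib
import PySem

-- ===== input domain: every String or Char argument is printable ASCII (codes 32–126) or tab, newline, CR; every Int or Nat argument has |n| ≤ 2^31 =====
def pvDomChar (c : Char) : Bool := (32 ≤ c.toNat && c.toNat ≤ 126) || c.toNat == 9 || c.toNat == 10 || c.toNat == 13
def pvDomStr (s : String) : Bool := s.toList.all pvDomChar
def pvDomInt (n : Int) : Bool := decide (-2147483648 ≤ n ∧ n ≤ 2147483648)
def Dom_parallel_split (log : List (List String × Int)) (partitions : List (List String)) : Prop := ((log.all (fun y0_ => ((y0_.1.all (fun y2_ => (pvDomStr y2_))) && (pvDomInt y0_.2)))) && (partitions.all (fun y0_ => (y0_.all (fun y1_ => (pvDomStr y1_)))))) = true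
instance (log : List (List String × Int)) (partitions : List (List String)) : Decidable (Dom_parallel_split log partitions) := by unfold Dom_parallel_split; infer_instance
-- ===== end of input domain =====

-- B is partition-major (per-partition owned set by set difference, then one filtering pass over the
-- traces per partition) instead of A's trace-major scan over partitions per event; return-value
-- equivalence is proved (alternative decomposition, no speed claim).

-- ===== PORT A =====
-- 'for i, partition in enumerate(partitions): if event in partition: sub_traces[i].append(event); break'
def pvA_place (subs : List (List String)) (ps : List (Int × List String)) (event : String) : List (List String) :=
  match ps with
  | [] => subs
  | (i, p) :: rest =>
    if PySem.Set.contains p event then subs.modify i.toNat (· ++ [event])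
    else pvA_place subs rest event

-- 'for i, sub_trace in enumerate(sub_traces): split_logs[i][tuple(sub_trace)] = split_logs[i].get(tuple(sub_trace), 0) + frequency'
def pvA_record (splits : List (PySem.Dict (List String) Int)) (subs : List (List String)) (freq : Int) :
    List (PySem.Dict (List String) Int) :=
  (PySem.List.enumerate subs).foldl
    (fun sp iv => sp.modify iv.1.toNat (fun d => d.insert iv.2 (d.getD iv.2 0 + freq))) splits

def parallel_split (log : List (List String × Int)) (partitions : List (List String)) : List (List (List String × Int)) :=
  let final := log.foldl
    (fun splits tf =>
      let subs := tf.1.foldl (fun subs event => pvA_place subs (PySem.List.enumerate partitions) event)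
        (List.replicate partitions.length [])
      if tf.1 = [] then splits
      else pvA_record splits subs tf.2)
    (List.replicate partitions.length PySem.Dict.empty)
  final.map (fun d => d.items)

-- ===== PORT B =====
-- partition-major: 'owned = set(partition) - seen; seen |= owned', then one pass over the log
-- filtering each trace through 'owned'
def parallel_split_alt (log : List (List String × Int)) (partitions : List (List String)) : List (List (List String × Int)) :=
  let final := partitions.foldl
    (fun acc partition =>
      let owned := PySem.Set.diff (PySem.Set.ofList partition) acc.2
      let seen := PySem.Set.union acc.2 owned
      let split := log.foldl
        (fun d tf =>
          if tf.1 = [] then d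
          else
            let key := tf.1.filter (fun e => PySem.Set.contains owned e)
            d.insert key (d.getD key 0 + tf.2))
        PySem.Dict.empty
      (acc.1 ++ [split], seen))
    (([] : List (PySem.Dict (List String) Int)), PySem.Set.empty)
  final.1.map (fun d => d.items)

-- ===== PRECONDITION & SPEC =====
def Spec_parallel_split (log : List (List String × Int)) (partitions : List (List String)) (out : List (List (List String × Int))) : Prop := out = parallel_split_alt log partitions
instance (log : List (List String × Int)) (partitions : List (List String)) (out : List (List (List String × Int))) : Decidable (Spec_parallel_split log partitions out) := by unfold Spec_parallel_split; infer_instance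

-- ===== CLAIM =====
def Claim_equal_parallel_split : Prop := ∀ (log : List (List String × Int)) (partitions : List (List String)), Dom_parallel_split log partitions → Spec_parallel_split log partitions (parallel_split log partitions)

-- ===== LEMMAS AND PROOFS =====

-- the dict one partition's split log accumulates, as a function of the Boolean "owned" predicate
def pvDlog (f : String → Bool) (log : List (List String × Int)) : PySem.Dict (List String) Int :=
  log.foldl
    (fun d tf =>
      if tf.1 = [] then d
      else d.insert (tf.1.filter f) ((d.getD (tf.1.filter f) 0) + tf.2))
    PySem.Dict.empty

-- membership in the k-th "owned" set produced by B's running set difference, unrolled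
def pvOwn (ps : List (List String)) (seen : PySem.Set String) (k : Nat) (e : String) : Bool :=
  match ps, k with
  | [], _ => false
  | p :: _, 0 => decide (e ∈ p) && !(PySem.Set.contains seen e)
  | p :: rest, k+1 =>
    pvOwn rest (PySem.Set.union seen (PySem.Set.diff (PySem.Set.ofList p) seen)) k e

-- A's per-event predicate: the first partition containing e is the k-th
def pvFirstIs (ps : List (List String)) (k : Nat) (e : String) : Bool :=
  ps.findIdx? (fun p => PySem.Set.contains p e) == some k

theorem pvOwn_of_mem (ps : List (List String)) (seen : PySem.Set String) (k : Nat) (e : String)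
    (hs : e ∈ seen) : pvOwn ps seen k e = false := by
  induction ps generalizing seen k with
  | nil => simp [pvOwn]
  | cons p rest ih =>
    cases k with
    | zero =>
      simp only [pvOwn]
      simp
      exact fun _ => hs
    | succ k =>
      exact ih _ k ((PySem.Set.mem_union _ _ _).mpr (Or.inl hs))

theorem pvOwn_eq_firstIs (ps : List (List String)) (seen : PySem.Set String) (k : Nat) (e : String)
    (hs : e ∉ seen) : pvOwn ps seen k e = pvFirstIs ps k e := by
  induction ps generalizing seen k with
  | nil => simp [pvOwn, pvFirstIs]
  | cons p rest ih =>
    have hcs : PySem.Set.contains seen e = false := by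
      simp only [Bool.eq_false_iff, ne_eq]
      intro h; exact hs ((PySem.Set.contains_iff seen e).mp h)
    cases k with
    | zero =>
      unfold pvOwn pvFirstIs
      rw [List.findIdx?_cons]
      by_cases hp : e ∈ p
      · simp [hp, hs]
      · have : PySem.Set.contains p e = false := by
          simp only [Bool.eq_false_iff, ne_eq]
          intro h; exact hp ((PySem.Set.contains_iff p e).mp h)
        simp only [hp, decide_false, Bool.false_and, this, Bool.false_eq_true, if_false]
        cases hf : rest.findIdx? (fun p => PySem.Set.contains p e) with
        | none => simp
        | some i => simp
    | succ k =>
      unfold pvOwn pvFirstIs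
      rw [List.findIdx?_cons]
      by_cases hp : e ∈ p
      · have hm : e ∈ PySem.Set.union seen (PySem.Set.diff (PySem.Set.ofList p) seen) :=
          (PySem.Set.mem_union _ _ _).mpr (Or.inr ((PySem.Set.mem_diff _ _ _).mpr
            ⟨(PySem.Set.mem_ofList _ _).mpr hp, hs⟩))
        rw [pvOwn_of_mem rest _ k e hm]
        simp [hp]
      · have hnm : e ∉ PySem.Set.union seen (PySem.Set.diff (PySem.Set.ofList p) seen) := by
          intro h
          rcases (PySem.Set.mem_union _ _ _).mp h with h | h
          · exact hs h
          · exact hp ((PySem.Set.mem_ofList _ _).mp ((PySem.Set.mem_diff _ _ _).mp h).1)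
        have hcp : PySem.Set.contains p e = false := by
          simp only [Bool.eq_false_iff, ne_eq]
          intro h; exact hp ((PySem.Set.contains_iff p e).mp h)
        rw [ih _ k hnm, hcp]
        unfold pvFirstIs
        simp only [Bool.false_eq_true, if_false]
        cases hf : rest.findIdx? (fun p => PySem.Set.contains p e) with
        | none => simp
        | some i => simp

theorem contains_diff_ofList (p : List String) (seen : PySem.Set String) (e : String) :
    PySem.Set.contains (PySem.Set.diff (PySem.Set.ofList p) seen) e =
      (decide (e ∈ p) && !(PySem.Set.contains seen e)) := by
  by_cases h1 : e ∈ p <;> by_cases h2 : e ∈ seen <;>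
    simp [h1, h2, PySem.Set.mem_diff, PySem.Set.mem_ofList]

theorem B_fold (ps : List (List String)) (log : List (List String × Int))
    (seen : PySem.Set String) (res : List (PySem.Dict (List String) Int)) :
    (ps.foldl
      (fun acc partition =>
        let owned := PySem.Set.diff (PySem.Set.ofList partition) acc.2
        let seen := PySem.Set.union acc.2 owned
        let split := log.foldl
          (fun d tf =>
            if tf.1 = [] then d
            else
              let key := tf.1.filter (fun e => PySem.Set.contains owned e)
              d.insert key (d.getD key 0 + tf.2))
          PySem.Dict.empty
        (acc.1 ++ [split], seen))
      (res, seen)).1 =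
    res ++ (List.range ps.length).map (fun k => pvDlog (pvOwn ps seen k) log) := by
  induction ps generalizing seen res with
  | nil => simp
  | cons p rest ih =>
    rw [List.foldl_cons]
    dsimp only
    rw [ih]
    rw [List.length_cons, List.range_succ_eq_map, List.map_cons, List.map_map]
    have h0 : (fun e => PySem.Set.contains (PySem.Set.diff (PySem.Set.ofList p) seen) e) =
        pvOwn (p :: rest) seen 0 := by
      funext e
      show PySem.Set.contains (PySem.Set.diff (PySem.Set.ofList p) seen) e =
        (decide (e ∈ p) && !(PySem.Set.contains seen e))
      exact contains_diff_ofList p seen e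
    rw [List.append_assoc, List.singleton_append]
    congr 2
    unfold pvDlog
    rw [← h0]

-- A's inner scan appends the event to the FIRST partition (from index s on) containing it.
theorem pvA_place_eq (ps : List (List String)) (s : Nat) (subs : List (List String)) (e : String) :
    pvA_place subs (PySem.List.enumerate ps (s : Int)) e =
      match ps.findIdx? (fun p => PySem.Set.contains p e) with
      | some i => subs.modify (s + i) (· ++ [e])
      | none => subs := by
  induction ps generalizing s with
  | nil => simp [PySem.List.enumerate_nil, pvA_place]
  | cons p rest ih =>
    rw [PySem.List.enumerate_cons, List.findIdx?_cons]
    by_cases h : PySem.Set.contains p e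
    · simp [pvA_place, (PySem.Set.contains_iff p e).mp h]
    · have hb : PySem.Set.contains p e = false := by simpa using h
      have hcast : ((s : Int) + 1) = ((s + 1 : Nat) : Int) := by push_cast; ring
      rw [pvA_place, if_neg h, hcast, ih (s + 1), hb]
      simp only [Bool.false_eq_true, if_false]
      cases hf : rest.findIdx? (fun p => PySem.Set.contains p e) with
      | none => simp
      | some i =>
        simp only [Option.map_some]
        have harith : s + 1 + i = s + (i + 1) := by omega
        rw [harith]

-- characterisation of A's sub_traces loop, index by index
theorem subs_char (ps : List (List String)) (t : List String) (subs : List (List String)) (i : Nat) :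
    (t.foldl (fun subs e => pvA_place subs (PySem.List.enumerate ps) e) subs)[i]? =
      (subs[i]?).map (· ++ t.filter (pvFirstIs ps i)) := by
  induction t generalizing subs with
  | nil => cases h : subs[i]? <;> simp [h]
  | cons e t' ih =>
    rw [List.foldl_cons, ih]
    rw [show PySem.List.enumerate ps = PySem.List.enumerate ps ((0 : Nat) : Int) from rfl,
      pvA_place_eq ps 0 subs e]
    cases hf : ps.findIdx? (fun p => PySem.Set.contains p e) with
    | none =>
      have hp : pvFirstIs ps i e = false := by unfold pvFirstIs; rw [hf]; rfl
      simp [hp]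
    | some j =>
      by_cases hji : j = i
      · subst hji
        have hp : pvFirstIs ps j e = true := by unfold pvFirstIs; rw [hf]; simp
        simp only [Nat.zero_add, List.getElem?_modify, List.filter_cons, hp, if_true]
        cases h : subs[j]? <;> simp [List.append_assoc]
      · have hp : pvFirstIs ps i e = false := by unfold pvFirstIs; rw [hf]; simp [hji]
        simp [hp, hji]

-- elementwise effect of A's record loop (a fold of modifies at distinct indices)
theorem record_get (subs : List (List String)) (s : Nat)
    (splits : List (PySem.Dict (List String) Int)) (freq : Int) (i : Nat) :
    ((PySem.List.enumerate subs (s : Int)).foldl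
        (fun sp iv => sp.modify iv.1.toNat (fun d => d.insert iv.2 (d.getD iv.2 0 + freq))) splits)[i]? =
      match (if s ≤ i then subs[i - s]? else none) with
      | some b => (splits[i]?).map (fun d => d.insert b (d.getD b 0 + freq))
      | none => splits[i]? := by
  induction subs generalizing s splits with
  | nil => simp [PySem.List.enumerate_nil]
  | cons x xs ih =>
    rw [PySem.List.enumerate_cons, List.foldl_cons]
    have hcast : ((s : Int) + 1) = ((s + 1 : Nat) : Int) := by push_cast; ring
    rw [hcast, ih (s + 1)]
    rcases Nat.lt_trichotomy i s with h | h | h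
    · have h1 : ¬ s ≤ i := by omega
      have h2 : ¬ s + 1 ≤ i := by omega
      have hne : s ≠ i := by omega
      simp only [h1, h2, if_false]
      rw [List.getElem?_modify]
      cases hs : splits[i]? <;> simp [hne]
    · subst h
      have h1 : i ≤ i := le_refl i
      have h2 : ¬ i + 1 ≤ i := by omega
      simp only [h1, h2, if_true, if_false]
      rw [List.getElem?_modify]
      have hii : ((i : Int)).toNat = i := Int.toNat_natCast i
      simp only [Nat.sub_self, List.getElem?_cons_zero]
      cases hs : splits[i]? <;> simp [hii]
    · have h1 : s ≤ i := by omega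
      have h2 : s + 1 ≤ i := by omega
      have hne : s ≠ i := by omega
      simp only [h1, h2, if_true]
      have hidx : (x :: xs)[i - s]? = xs[i - (s + 1)]? := by
        have : i - s = (i - (s + 1)) + 1 := by omega
        rw [this, List.getElem?_cons_succ]
      rw [hidx, List.getElem?_modify]
      cases hx : xs[i - (s + 1)]? <;> cases hs : splits[i]? <;> simp [hne]

theorem record_length (subs : List (List String)) (s : Int)
    (splits : List (PySem.Dict (List String) Int)) (freq : Int) :
    ((PySem.List.enumerate subs s).foldl
        (fun sp iv => sp.modify iv.1.toNat (fun d => d.insert iv.2 (d.getD iv.2 0 + freq))) splits).length =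
      splits.length := by
  induction subs generalizing s splits with
  | nil => simp [PySem.List.enumerate_nil]
  | cons x xs ih =>
    rw [PySem.List.enumerate_cons, List.foldl_cons, ih, List.length_modify]

-- A's whole log fold, index by index
theorem A_fold_get (ps : List (List String)) (log : List (List String × Int))
    (splits : List (PySem.Dict (List String) Int)) (i : Nat) (hl : splits.length = ps.length) :
    (log.foldl
      (fun splits tf =>
        let subs := tf.1.foldl (fun subs event => pvA_place subs (PySem.List.enumerate ps) event)
          (List.replicate ps.length [])
        if tf.1 = [] then splits
        else pvA_record splits subs tf.2)
      splits)[i]? =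
    (splits[i]?).map (fun d0 =>
      log.foldl
        (fun d tf =>
          if tf.1 = [] then d
          else d.insert (tf.1.filter (pvFirstIs ps i)) ((d.getD (tf.1.filter (pvFirstIs ps i)) 0) + tf.2))
        d0) := by
  induction log generalizing splits with
  | nil => cases h : splits[i]? <;> simp [h]
  | cons tf log' ih =>
    simp only [List.foldl_cons]
    by_cases ht : tf.1 = []
    · simp only [ht, if_pos]
      rw [ih splits hl]
    · simp only [ht, if_false]
      have hl' : (pvA_record splits
          (tf.1.foldl (fun subs event => pvA_place subs (PySem.List.enumerate ps) event)
            (List.replicate ps.length [])) tf.2).length = ps.length := by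
        unfold pvA_record
        rw [record_length, hl]
      rw [ih _ hl']
      have hrec := record_get
        (tf.1.foldl (fun subs event => pvA_place subs (PySem.List.enumerate ps) event)
          (List.replicate ps.length [])) 0 splits tf.2 i
      have hsub := subs_char ps tf.1 (List.replicate ps.length []) i
      rw [List.getElem?_replicate] at hsub
      unfold pvA_record
      simp only [Nat.cast_zero, Nat.zero_le, if_true, Nat.sub_zero] at hrec
      by_cases hin : i < ps.length
      · rw [hsub] at hrec
        simp only [hin, if_true, Option.map_some, List.nil_append] at hrec
        rw [hrec]
        cases hs : splits[i]? <;> simp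
      · have hnone1 : splits[i]? = none := by
          rw [List.getElem?_eq_none_iff]; omega
        have hnone2 : (pvA_record splits
            (tf.1.foldl (fun subs event => pvA_place subs (PySem.List.enumerate ps) event)
              (List.replicate ps.length [])) tf.2)[i]? = none := by
          rw [List.getElem?_eq_none_iff, hl']; omega
        unfold pvA_record at hnone2
        rw [hnone2, hnone1]
        simp

-- ===== VERDICT =====
theorem parallel_split_spec : Claim_equal_parallel_split := by
  intro log partitions _
  unfold Spec_parallel_split parallel_split parallel_split_alt
  dsimp only
  rw [B_fold partitions log PySem.Set.empty [], List.nil_append]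
  congr 1
  apply List.ext_getElem?
  intro i
  rw [A_fold_get partitions log _ i (List.length_replicate ..), List.getElem?_replicate,
    List.getElem?_map]
  by_cases hi : i < partitions.length
  · rw [List.getElem?_range hi]
    simp only [hi, if_true, Option.map_some]
    have hfn : pvOwn partitions PySem.Set.empty i = pvFirstIs partitions i := by
      funext e
      exact pvOwn_eq_firstIs partitions PySem.Set.empty i e (List.not_mem_nil)
    rw [hfn]
    rfl
  · have hr : (List.range partitions.length)[i]? = none := by
      rw [List.getElem?_eq_none_iff, List.length_range]; omega
    rw [hr]
    simp [hi]
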